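-- pv_equiv track=rewrite | github.com/Hainn-120901/map_baogiaxe | map_general/map_hang_muc_xe/map_hang_muc_xe_final.py | get_cluster_text_with_len
-- ===== SOURCE A (Python) =====
-- def get_cluster_text_with_len(line_encode_arr, line_arr):
--     max_len_split_text = len(line_encode_arr)
--     list_text_all, list_text_real_all = [], []
--     for len_ms in range(max_len_split_text):
--         list_text, list_text_real = [], []
--         for index in range(max_len_split_text - len_ms):
--             list_text.append(" ".join(line_encode_arr[index:index + len_ms + 1]))
--             list_text_real.append(" ".join(line_arr[index:index + len_ms + 1]))
--         list_text_all.append(list_text)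
--         list_text_real_all.append(list_text_real)
--     return list_text_all, list_text_real_all
-- ===== SOURCE B (Python) =====
-- def get_cluster_text_with_len(line_encode_arr, line_arr):
--     # Build the windows row by row: each length-k row extends the previous row
--     # by one more word per window, instead of re-joining every slice from scratch.
--     n = len(line_encode_arr)
--     all_e, all_r = [], []
--     if n == 0:
--         return all_e, all_r
--     row_e = list(line_encode_arr)
--     row_r = list(line_arr[:n])
--     all_e.append(row_e)
--     all_r.append(row_r)
--     for k in range(2, n + 1):
--         row_e = [row_e[i] + " " + line_encode_arr[i + k - 1] for i in range(n - k + 1)]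
--         row_r = [row_r[i] + " " + line_arr[i + k - 1] for i in range(n - k + 1)]
--         all_e.append(row_e)
--         all_r.append(row_r)
--     return all_e, all_r
-- ===== Notes on version B (the rewrite author's own statement) =====
-- stated objective: alternative
-- what changed: B builds the rows incrementally (each length-k row extends the length-(k-1) row by one appended word per window) instead of re-slicing and re-joining every window from scratch; Pre_ excludes inputs where line_arr is shorter than line_encode_arr, on which A's slices silently truncate while B's direct indexing raises IndexError.
-- outside the precondition, e.g. on get_cluster_text_with_len(['a', 'b'], []): A returns ([['a', 'b'], ['a b']], [['', ''], ['']]), B raises IndexError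
import Mathlib
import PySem

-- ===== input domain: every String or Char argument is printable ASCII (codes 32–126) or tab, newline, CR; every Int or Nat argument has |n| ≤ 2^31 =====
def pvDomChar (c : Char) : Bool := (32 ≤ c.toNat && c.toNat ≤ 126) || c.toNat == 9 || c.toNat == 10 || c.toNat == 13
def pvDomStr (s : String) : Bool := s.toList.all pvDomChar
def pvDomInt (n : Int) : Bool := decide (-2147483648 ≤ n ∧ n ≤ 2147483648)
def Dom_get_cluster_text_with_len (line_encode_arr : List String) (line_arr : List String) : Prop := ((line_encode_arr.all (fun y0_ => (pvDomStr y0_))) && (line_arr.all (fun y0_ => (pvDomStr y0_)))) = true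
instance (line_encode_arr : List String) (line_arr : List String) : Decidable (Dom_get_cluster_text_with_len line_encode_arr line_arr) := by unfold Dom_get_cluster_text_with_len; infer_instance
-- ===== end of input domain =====

-- B builds each row of window joins incrementally from the previous row (one word appended per
-- window) instead of re-slicing and re-joining every window from scratch; alternative decomposition.

-- ===== PORT A =====
-- inner loop of A: builds (list_text, list_text_real) for one len_ms
def pvInnerA (line_encode_arr line_arr : List String) (n len_ms : Int) : List String × List String :=
  (PySem.List.pyRange 0 (n - len_ms) 1).foldl
    (fun (p : List String × List String) index =>
      (p.1 ++ [PySem.Str.join " " (PySem.List.slice line_encode_arr (some index) (some (index + len_ms + 1)))],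
       p.2 ++ [PySem.Str.join " " (PySem.List.slice line_arr (some index) (some (index + len_ms + 1)))]))
    ([], [])

def get_cluster_text_with_len (line_encode_arr : List String) (line_arr : List String) : List (List String) × List (List String) :=
  let max_len_split_text : Int := line_encode_arr.length
  (PySem.List.pyRange 0 max_len_split_text 1).foldl
    (fun (st : List (List String) × List (List String)) len_ms =>
      (st.1 ++ [(pvInnerA line_encode_arr line_arr max_len_split_text len_ms).1],
       st.2 ++ [(pvInnerA line_encode_arr line_arr max_len_split_text len_ms).2]))
    ([], [])

-- ===== PORT B =====
-- Python 'a + b' on str: concatenation of the code points (exact)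
def pvStrAdd (a b : String) : String := String.ofList (a.toList ++ b.toList)

-- loop body of B: extend both previous rows by one word per window (k = j + 2).
-- line_…_arr[i + k - 1] is ported with getD ""; under Pre_ the index is always in range
-- (outside Pre_ the Python raises IndexError and nothing is claimed).
def pvStepB (line_encode_arr line_arr : List String) (n : Nat)
    (st : (List (List String) × List (List String)) × (List String × List String)) (j : Nat) :
    (List (List String) × List (List String)) × (List String × List String) :=
  let k := j + 2
  let re := (List.range (n - k + 1)).map
    (fun i => pvStrAdd (pvStrAdd (st.2.1.getD i "") " ") (line_encode_arr.getD (i + k - 1) ""))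
  let rr := (List.range (n - k + 1)).map
    (fun i => pvStrAdd (pvStrAdd (st.2.2.getD i "") " ") (line_arr.getD (i + k - 1) ""))
  ((st.1.1 ++ [re], st.1.2 ++ [rr]), (re, rr))

def get_cluster_text_with_len_alt (line_encode_arr : List String) (line_arr : List String) : List (List String) × List (List String) :=
  let n := line_encode_arr.length
  if n = 0 then ([], []) else
  let row_e0 := line_encode_arr
  let row_r0 := line_arr.take n
  -- for k in range(2, n + 1), as j = k - 2 over range(n - 1)
  let st := (List.range (n - 1)).foldl (pvStepB line_encode_arr line_arr n)
    (([row_e0], [row_r0]), (row_e0, row_r0))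
  st.1

-- ===== PRECONDITION & SPEC =====
-- Pre_ excludes inputs where line_arr is shorter than line_encode_arr: there A's slices silently
-- truncate (joining fewer words than the window asks for) while B's direct indexing raises IndexError.
def Pre_get_cluster_text_with_len (line_encode_arr : List String) (line_arr : List String) : Prop :=
  line_encode_arr.length ≤ line_arr.length
instance (line_encode_arr : List String) (line_arr : List String) : Decidable (Pre_get_cluster_text_with_len line_encode_arr line_arr) := by unfold Pre_get_cluster_text_with_len; infer_instance

def pvWitness_get_cluster_text_with_len : List String × List String := (["ab", "c"], ["xy", "z"])

def Spec_get_cluster_text_with_len (line_encode_arr : List String) (line_arr : List String) (out : List (List String) × List (List String)) : Prop := out = get_cluster_text_with_len_alt line_encode_arr line_arr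
instance (line_encode_arr : List String) (line_arr : List String) (out : List (List String) × List (List String)) : Decidable (Spec_get_cluster_text_with_len line_encode_arr line_arr out) := by unfold Spec_get_cluster_text_with_len; infer_instance

-- ===== CLAIM (what is proved, stated in full; the proofs are below) =====
def Claim_equal_get_cluster_text_with_len : Prop := ∀ (line_encode_arr : List String) (line_arr : List String), Dom_get_cluster_text_with_len line_encode_arr line_arr → Pre_get_cluster_text_with_len line_encode_arr line_arr → Spec_get_cluster_text_with_len line_encode_arr line_arr (get_cluster_text_with_len line_encode_arr line_arr)

-- ===== LEMMAS AND PROOFS =====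

-- " ".join(arr[i:i+k]) at the char-list level
def pvJl (arr : List String) (i k : Nat) : List Char :=
  PySem.Chars.join [' '] (((arr.drop i).take k).map String.toList)

-- the row of all windows of length k over n positions
def pvRow (arr : List String) (n k : Nat) : List String :=
  (List.range (n - (k - 1))).map (fun i => String.ofList (pvJl arr i k))

def pvSpec (e r : List String) : List (List String) × List (List String) :=
  ((List.range e.length).map (fun j => pvRow e e.length (j + 1)),
   (List.range e.length).map (fun j => pvRow r e.length (j + 1)))

theorem pv_join_append_singleton (sep p : List Char) (ps : List (List Char)) (h : ps ≠ []) :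
    PySem.Chars.join sep (ps ++ [p]) = PySem.Chars.join sep ps ++ sep ++ p := by
  induction ps with
  | nil => exact absurd rfl h
  | cons q qs ih =>
    cases qs with
    | nil => simp [PySem.Chars.join_cons_cons, PySem.Chars.join_singleton]
    | cons q' qs' =>
      have h2 := ih (by simp)
      simp only [List.cons_append] at h2 ⊢
      rw [PySem.Chars.join_cons_cons, h2, PySem.Chars.join_cons_cons]
      simp [List.append_assoc]

theorem pvJl_one (arr : List String) (i : Nat) :
    pvJl arr i 1 = if i < arr.length then (arr.getD i "").toList else [] := by
  unfold pvJl
  by_cases h : i < arr.length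
  · rw [show (1 : Nat) = 0 + 1 from rfl, List.take_add_one]
    simp [List.getElem?_drop, List.getElem?_eq_getElem h, PySem.Chars.join_singleton, if_pos h]
  · rw [List.drop_eq_nil_of_le (by omega)]
    simp [PySem.Chars.join_nil, if_neg h]

theorem pvJl_succ (arr : List String) (i k : Nat) (hk : 1 ≤ k) :
    pvJl arr i (k + 1) =
      if i + k < arr.length then pvJl arr i k ++ ' ' :: (arr.getD (i + k) "").toList
      else pvJl arr i k := by
  unfold pvJl
  by_cases h : i + k < arr.length
  · have hdrop : (arr.drop i)[k]? = some arr[i + k] := by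
      rw [List.getElem?_drop, List.getElem?_eq_getElem h]
    rw [List.take_add_one, hdrop]
    have hne : (((arr.drop i).take k).map String.toList) ≠ [] := by
      have hlen : 0 < ((arr.drop i).take k).length := by
        simp only [List.length_take, List.length_drop]
        omega
      simp only [ne_eq, List.map_eq_nil_iff]
      exact fun hnil => by simp [hnil] at hlen
    rw [Option.toList_some, List.map_append, List.map_singleton,
      pv_join_append_singleton _ _ _ hne, if_pos h,
      List.getD_eq_getElem arr "" h]
    simp
  · rw [if_neg h, List.take_of_length_le, List.take_of_length_le] <;>
      simp only [List.length_drop] <;> omega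

theorem pvRow_one_encode (e : List String) : pvRow e e.length 1 = e := by
  unfold pvRow
  apply List.ext_getElem
  · simp
  · intro i h1 h2
    simp only [List.getElem_map, List.getElem_range]
    have hi : i < e.length := by simpa using h1
    rw [pvJl_one, if_pos hi, List.getD_eq_getElem e "" hi, String.ofList_toList]

theorem pvRow_one_real (r : List String) (n : Nat) (h : n ≤ r.length) :
    pvRow r n 1 = r.take n := by
  unfold pvRow
  apply List.ext_getElem
  · simp; omega
  · intro i h1 h2
    simp only [List.getElem_map, List.getElem_range]
    have hi : i < n := by simpa using h1
    have hir : i < r.length := by omega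
    rw [pvJl_one, if_pos hir, List.getD_eq_getElem r "" hir, String.ofList_toList,
      List.getElem_take]

-- Str.join with separator " " in terms of pvJl's char-level join
theorem pvStrJoin_space (parts : List String) :
    PySem.Str.join " " parts = String.ofList (PySem.Chars.join [' '] (parts.map String.toList)) := rfl

-- ===== A side =====
theorem pvInnerA_eq (e r : List String) (j : Nat) (hj : j ≤ e.length) :
    pvInnerA e r (e.length : Int) (j : Int) = (pvRow e e.length (j + 1), pvRow r e.length (j + 1)) := by
  unfold pvInnerA
  rw [PySem.List.foldl_prod_mk
      (fun (a : List String) x => a ++ [PySem.Str.join " " (PySem.List.slice e (some x) (some (x + (j : Int) + 1)))])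
      (fun (a : List String) x => a ++ [PySem.Str.join " " (PySem.List.slice r (some x) (some (x + (j : Int) + 1)))]),
    PySem.List.foldl_append_singleton_eq_map, PySem.List.foldl_append_singleton_eq_map]
  have hrange : PySem.List.pyRange 0 ((e.length : Int) - (j : Int)) 1
      = List.map (fun k : Nat => (k : Int)) (List.range (e.length - j)) := by
    rw [show ((e.length : Int) - (j : Int)) = ((e.length - j : Nat) : Int) by omega,
      PySem.List.pyRange_zero_natCast]
  rw [hrange]
  have hone : ∀ (arr : List String) (i : Nat),
      PySem.Str.join " " (PySem.List.slice arr (some ((i : Nat) : Int)) (some (((i : Nat) : Int) + (j : Int) + 1)))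
        = String.ofList (pvJl arr i (j + 1)) := by
    intro arr i
    rw [show (((i : Nat) : Int) + (j : Int) + 1) = ((i : Nat) : Int) + ((j + 1 : Nat) : Int) by push_cast; ring,
      PySem.List.slice_natCast_add, pvStrJoin_space]
    rfl
  unfold pvRow
  simp only [Prod.mk.injEq, List.map_map, Nat.add_sub_cancel, Function.comp_def, List.nil_append]
  constructor <;>
  · apply List.map_congr_left
    intro i _
    exact hone _ i

theorem pvA_eq (e r : List String) : get_cluster_text_with_len e r = pvSpec e r := by
  simp only [get_cluster_text_with_len]
  rw [PySem.List.foldl_prod_mk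
      (fun (a : List (List String)) x => a ++ [(pvInnerA e r (e.length : Int) x).1])
      (fun (a : List (List String)) x => a ++ [(pvInnerA e r (e.length : Int) x).2]),
    PySem.List.foldl_append_singleton_eq_map, PySem.List.foldl_append_singleton_eq_map,
    PySem.List.pyRange_zero_natCast]
  unfold pvSpec
  simp only [Prod.mk.injEq, List.map_map, List.nil_append, Function.comp_def]
  constructor <;>
  · apply List.map_congr_left
    intro j hj
    rw [pvInnerA_eq e r j (le_of_lt (List.mem_range.mp hj))]

-- ===== B side =====
theorem pvLoopB (e r : List String) (hn : 1 ≤ e.length) (hr : e.length ≤ r.length)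
    (m : Nat) (hm : m ≤ e.length - 1) :
    (List.range m).foldl (pvStepB e r e.length)
      (([e], [r.take e.length]), (e, r.take e.length))
    = (((List.range (m + 1)).map (fun j => pvRow e e.length (j + 1)),
        (List.range (m + 1)).map (fun j => pvRow r e.length (j + 1))),
       (pvRow e e.length (m + 1), pvRow r e.length (m + 1))) := by
  induction m with
  | zero =>
    simp only [List.range_zero, List.foldl_nil, Nat.zero_add, List.range_one,
      List.map_cons, List.map_nil]
    rw [pvRow_one_encode, pvRow_one_real r e.length hr]
  | succ m ih =>
    rw [List.range_succ, List.foldl_append, ih (by omega), List.foldl_cons, List.foldl_nil]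
    have hre : (List.range (e.length - (m + 2) + 1)).map
        (fun i => pvStrAdd (pvStrAdd ((pvRow e e.length (m + 1)).getD i "") " ") (e.getD (i + (m + 2) - 1) ""))
        = pvRow e e.length (m + 2) := by
      unfold pvRow
      rw [show e.length - (m + 2) + 1 = e.length - (m + 2 - 1) by omega]
      apply List.map_congr_left
      intro i hi
      have hi' : i < e.length - (m + 1) := by
        have := List.mem_range.mp hi; omega
      rw [PySem.List.getD_map_range (fun i => String.ofList (pvJl e i (m + 1)))
          (e.length - (m + 1 - 1)) i "" (by omega)]
      unfold pvStrAdd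
      rw [show (i + (m + 2) - 1) = i + (m + 1) by omega,
        show m + 2 = m + 1 + 1 from rfl,
        pvJl_succ e i (m + 1) (by omega), if_pos (by omega)]
      simp only [String.toList_ofList]
      rw [show (" ".toList) = [' '] from rfl]
      simp [List.append_assoc]
    have hrr : (List.range (e.length - (m + 2) + 1)).map
        (fun i => pvStrAdd (pvStrAdd ((pvRow r e.length (m + 1)).getD i "") " ") (r.getD (i + (m + 2) - 1) ""))
        = pvRow r e.length (m + 2) := by
      unfold pvRow
      rw [show e.length - (m + 2) + 1 = e.length - (m + 2 - 1) by omega]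
      apply List.map_congr_left
      intro i hi
      have hi' : i < e.length - (m + 1) := by
        have := List.mem_range.mp hi; omega
      rw [PySem.List.getD_map_range (fun i => String.ofList (pvJl r i (m + 1)))
          (e.length - (m + 1 - 1)) i "" (by omega)]
      unfold pvStrAdd
      rw [show (i + (m + 2) - 1) = i + (m + 1) by omega,
        show m + 2 = m + 1 + 1 from rfl,
        pvJl_succ r i (m + 1) (by omega), if_pos (by omega)]
      simp only [String.toList_ofList]
      rw [show (" ".toList) = [' '] from rfl]
      simp [List.append_assoc]
    simp only [pvStepB]
    rw [hre, hrr]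
    simp [List.range_succ]

theorem pvB_eq (e r : List String) (hr : e.length ≤ r.length) :
    get_cluster_text_with_len_alt e r = pvSpec e r := by
  simp only [get_cluster_text_with_len_alt]
  by_cases h : e.length = 0
  · rw [if_pos h]
    simp [pvSpec, h]
  · rw [if_neg h, pvLoopB e r (by omega) hr (e.length - 1) (by omega),
      show e.length - 1 + 1 = e.length by omega]
    rfl

-- ===== VERDICT (by name: the statement is the Claim_ definition above) =====
theorem get_cluster_text_with_len_spec : Claim_equal_get_cluster_text_with_len := by
  intro e r _ hpre
  unfold Spec_get_cluster_text_with_len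
  rw [pvA_eq, pvB_eq e r hpre]
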